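-- pv_equiv track=rewrite | github.com/psemdel/CyclingInitBot | gpx_to_svg2.py | combineSegmentPairs
-- ===== SOURCE A (Python) =====
-- def searchCircularSegments(gpsData):
--     """Splits a GPS dataset to tracks that are circular and other tracks"""
--
--     circularSegments = []
--     straightSegments = []
--
--     for segment in gpsData:
--         if segment[0] == segment[len(segment) - 1]:
--             circularSegments.append(segment)
--         else:
--             straightSegments.append(segment)
--
--     return circularSegments, straightSegments
--
-- def combineSegmentPairs(gpsData):
--     """Combine segment pairs to one bigger segment"""
--
--     combinedData = []
--     # Walk through the GPS data and search for segment pairs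
--     # that end with the starting point of another track
--     while len(gpsData) > 0:
--         # Get one segment from the source GPS data
--         firstTrackData = gpsData.pop()
--         foundMatch = False
--
--         # Try to find a matching segment
--         for i in range(len(gpsData)):
--             if firstTrackData[len(firstTrackData) - 1] == gpsData[i][0]:
--                 # There is a matching segment, so break here
--                 foundMatch = True
--                 break
--
--         if foundMatch == True:
--             # We found a pair of segments with one shared point, so pop the data of the second
--             # segment from the source GPS data and create a new segment containing all data, but
--             # without the overlapping point
--             firstTrackData.pop()
--             combinedData.append(firstTrackData + gpsData[i])
--             gpsData.pop(i)
--         else: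
--             # No segment with a shared point was found, so just append the data to the output
--             combinedData.append(firstTrackData)
--
--     return searchCircularSegments(combinedData)
-- ===== SOURCE B (Python) =====
-- def combineSegmentPairs(gpsData):
--     """Combine segment pairs to one bigger segment.
--
--     Same return value as the original (the original also empties its argument
--     list in place; this version leaves it untouched).  One pass from the back
--     with a start-point index (dict of index buckets, lazily pruned) instead of
--     a rescanning inner loop, and the circular/straight split fused in.
--     """
--     n = len(gpsData)
--     buckets = {}
--     for i in range(n - 1, -1, -1):
--         # decreasing order: the smallest index of each bucket sits at the end
--         buckets.setdefault(tuple(gpsData[i][0]), []).append(i)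
--     used = set()
--     circularSegments = []
--     straightSegments = []
--     for j in range(n - 1, -1, -1):
--         if j in used:
--             continue
--         used.add(j)
--         t = gpsData[j]
--         bucket = buckets.get(tuple(t[-1]), [])
--         while bucket and bucket[-1] in used:
--             bucket.pop()
--         if bucket:
--             i = bucket.pop()
--             used.add(i)
--             merged = t[:-1] + gpsData[i]
--         else:
--             merged = t
--         if merged[0] == merged[-1]:
--             circularSegments.append(merged)
--         else:
--             straightSegments.append(merged)
--     return circularSegments, straightSegments
-- ===== Notes on version B (the rewrite author's own statement) =====
-- stated objective: faster
-- what changed: Instead of repeatedly popping a segment and rescanning the whole remaining list for a matching start point (and erasing by index), B builds once a dict mapping each start point to the increasing list of segment indices and walks the segments back-to-front with a used-set, taking the smallest live index from the bucket with lazy pruning, splitting circular/straight in the same pass.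
import Mathlib
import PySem

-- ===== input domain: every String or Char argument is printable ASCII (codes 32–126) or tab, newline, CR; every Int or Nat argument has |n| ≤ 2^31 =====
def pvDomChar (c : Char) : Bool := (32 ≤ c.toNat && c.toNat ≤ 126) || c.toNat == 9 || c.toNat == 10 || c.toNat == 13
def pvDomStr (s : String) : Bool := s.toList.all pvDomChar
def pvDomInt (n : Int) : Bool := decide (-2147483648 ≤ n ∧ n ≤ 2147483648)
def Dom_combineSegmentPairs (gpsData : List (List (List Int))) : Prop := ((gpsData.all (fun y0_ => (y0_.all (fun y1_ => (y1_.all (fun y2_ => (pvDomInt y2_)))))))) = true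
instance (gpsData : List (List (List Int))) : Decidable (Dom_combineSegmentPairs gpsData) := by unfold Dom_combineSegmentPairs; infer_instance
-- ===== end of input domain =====

-- B replaces A's pop-and-rescan quadratic pairing loop by a one-pass start-point index with a
-- used-set (faster); A also empties its argument list in place, which is not modelled here:
-- the equivalence proved is about the RETURN value only.

-- ===== PORT A =====

-- segment[0] and segment[len(segment)-1]; the default is only reached on an empty
-- segment, where the Python raises IndexError (excluded by Pre_).
def pvSegStart (s : List (List Int)) : List Int := s.head?.getD []
def pvSegEnd (s : List (List Int)) : List Int := s.getLast?.getD []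

-- the `while len(gpsData) > 0` loop of A: pop the last segment, linear-scan the rest
-- (`for i in range(len(gpsData))` + findIdx?-style first match), and either merge with the
-- matched segment (erasing it) or emit the popped segment; `combinedData.append` in
-- processing order becomes cons before the recursive call.
def pvGoA (gps : List (List (List Int))) : List (List (List Int)) :=
  if h : gps = [] then []
  else
    let t := gps.getLast h
    let rest := gps.dropLast
    match rest.findIdx? (fun s => pvSegEnd t == pvSegStart s) with
    | none => t :: pvGoA rest
    | some i => (t.dropLast ++ rest.getD i []) :: pvGoA (rest.eraseIdx i)
termination_by gps.length
decreasing_by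
  · have : gps.dropLast.length < gps.length := by
      cases gps with
      | nil => simp at h
      | cons a l => simp [List.dropLast]
    simpa using this
  · have h1 : gps.dropLast.length < gps.length := by
      cases gps with
      | nil => simp at h
      | cons a l => simp [List.dropLast]
    calc (gps.dropLast.eraseIdx i).length ≤ gps.dropLast.length := List.length_eraseIdx_le _ _
      _ < gps.length := h1

def searchCircularSegments (l : List (List (List Int))) :
    List (List (List Int)) × List (List (List Int)) :=
  l.foldl (fun cs seg =>
    if pvSegStart seg == pvSegEnd seg then (cs.1 ++ [seg], cs.2) else (cs.1, cs.2 ++ [seg]))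
    ([], [])

def combineSegmentPairs (gpsData : List (List (List Int))) :
    List (List (List Int)) × List (List (List Int)) :=
  searchCircularSegments (pvGoA gpsData)

-- ===== PORT B =====

-- `for i in range(n-1,-1,-1): buckets.setdefault(tuple(gpsData[i][0]), []).append(i)`
-- (countdown loop: each bucket holds its indices in decreasing order, smallest last)
def pvBuckets (gpsData : List (List (List Int))) : PySem.Dict (List Int) (List Nat) :=
  (List.range gpsData.length).reverse.foldl
    (fun d i => d.insert (pvSegStart (gpsData.getD i []))
                         (d.getD (pvSegStart (gpsData.getD i [])) [] ++ [i]))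
    PySem.Dict.empty

-- the `for j in range(n-1,-1,-1)` loop of B: j+1 is the number of indices still to visit;
-- `while bucket and bucket[-1] in used: bucket.pop()` (pop used entries off the END, then
-- `i = bucket.pop()`) is rendered functionally as dropWhile on the bucket's reverse, and the
-- remaining entries (reversed back to stored order) are written into the dict; appends to
-- the two output lists become cons after the recursive call.
def pvGoB (gps : List (List (List Int))) :
    Nat → PySem.Set Nat → PySem.Dict (List Int) (List Nat) →
    List (List (List Int)) × List (List (List Int))
  | 0, _, _ => ([], [])
  | j + 1, used, bk =>
    if PySem.Set.contains used j then pvGoB gps j used bk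
    else
      let used1 := PySem.Set.add used j
      let t := gps.getD j []
      let key := pvSegEnd t
      match (bk.getD key []).reverse.dropWhile (fun i => PySem.Set.contains used1 i) with
      | [] =>
        let res := pvGoB gps j used1 (bk.insert key [])
        if pvSegStart t == pvSegEnd t then (t :: res.1, res.2) else (res.1, t :: res.2)
      | i :: brest =>
        let merged := t.dropLast ++ gps.getD i []
        let res := pvGoB gps j (PySem.Set.add used1 i) (bk.insert key brest.reverse)
        if pvSegStart merged == pvSegEnd merged then (merged :: res.1, res.2)
        else (res.1, merged :: res.2)

def combineSegmentPairs_alt (gpsData : List (List (List Int))) :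
    List (List (List Int)) × List (List (List Int)) :=
  pvGoB gpsData gpsData.length PySem.Set.empty (pvBuckets gpsData)

-- ===== PRECONDITION & SPEC =====

-- Pre_ excludes inputs containing an empty segment: there the Python A raises IndexError
-- (segment[len(segment)-1] on []), and B raises too.
def Pre_combineSegmentPairs (gpsData : List (List (List Int))) : Prop :=
  ∀ seg ∈ gpsData, seg ≠ []
instance (gpsData : List (List (List Int))) : Decidable (Pre_combineSegmentPairs gpsData) := by
  unfold Pre_combineSegmentPairs; infer_instance

def pvWitness_combineSegmentPairs : List (List (List Int)) :=
  [[[0, 0], [1, 1]], [[1, 1], [2, 2]], [[3, 3], [3, 3]]]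

def Spec_combineSegmentPairs (gpsData : List (List (List Int)))
    (out : List (List (List Int)) × List (List (List Int))) : Prop :=
  out = combineSegmentPairs_alt gpsData
instance (gpsData : List (List (List Int)))
    (out : List (List (List Int)) × List (List (List Int))) :
    Decidable (Spec_combineSegmentPairs gpsData out) := by
  unfold Spec_combineSegmentPairs; infer_instance

-- ===== CLAIM (what is proved, stated in full; the proofs are below) =====
def Claim_equal_combineSegmentPairs : Prop :=
  ∀ (gpsData : List (List (List Int))), Dom_combineSegmentPairs gpsData →
    Pre_combineSegmentPairs gpsData →
    Spec_combineSegmentPairs gpsData (combineSegmentPairs gpsData)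

-- ===== LEMMAS AND PROOFS =====

-- A's remaining pool after B has visited indices ≥ j: the segments at the not-yet-used
-- indices below j, in original order.
def pvState (gps : List (List (List Int))) (j : Nat) (used : List Nat) :
    List (List (List Int)) :=
  ((List.range j).filter (fun i => !decide (i ∈ used))).map (fun i => gps.getD i [])

-- invariant tying B's loop state to A's pool: indices ≥ j are used, and each bucket is an
-- increasing list of indices with the given start point containing every unused such index
def pvInv (gps : List (List (List Int))) (j : Nat) (used : List Nat)
    (bk : PySem.Dict (List Int) (List Nat)) : Prop :=
  j ≤ gps.length ∧
  (∀ i, j ≤ i → i < gps.length → i ∈ used) ∧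
  ∀ k : List Int,
    ((bk.getD k []).reverse).Pairwise (· < ·) ∧
    (∀ i ∈ (bk.getD k []).reverse, i < gps.length ∧ pvSegStart (gps.getD i []) = k) ∧
    (∀ i, i < gps.length → i ∉ used → pvSegStart (gps.getD i []) = k →
      i ∈ (bk.getD k []).reverse)

lemma pvGoA_nil : pvGoA [] = [] := by rw [pvGoA]; simp

lemma pvGoA_concat (L : List (List (List Int))) (t : List (List Int)) :
    pvGoA (L ++ [t]) =
      match L.findIdx? (fun s => pvSegEnd t == pvSegStart s) with
      | none => t :: pvGoA L
      | some i => (t.dropLast ++ L.getD i []) :: pvGoA (L.eraseIdx i) := by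
  rw [pvGoA]
  have hne : L ++ [t] ≠ [] := by simp
  simp only [hne, dite_false, List.getLast_append, List.dropLast_concat]
  simp

lemma pvSearch_eq (l : List (List (List Int))) :
    searchCircularSegments l =
      (l.filter (fun s => pvSegStart s == pvSegEnd s),
       l.filter (fun s => !(pvSegStart s == pvSegEnd s))) := by
  unfold searchCircularSegments
  have h1 : (fun (cs : List (List (List Int)) × List (List (List Int))) seg =>
      if pvSegStart seg == pvSegEnd seg then (cs.1 ++ [seg], cs.2) else (cs.1, cs.2 ++ [seg]))
      = (fun cs seg => (if pvSegStart seg == pvSegEnd seg then cs.1 ++ [seg] else cs.1,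
                        if !(pvSegStart seg == pvSegEnd seg) then cs.2 ++ [seg] else cs.2)) := by
    funext cs seg; cases h : (pvSegStart seg == pvSegEnd seg) <;> simp [h]
  rw [h1, PySem.List.foldl_prod_mk
        (f := fun acc seg => if pvSegStart seg == pvSegEnd seg then acc ++ [seg] else acc)
        (g := fun acc seg => if !(pvSegStart seg == pvSegEnd seg) then acc ++ [seg] else acc),
      PySem.List.foldl_append_if_eq_filter, PySem.List.foldl_append_if_eq_filter]
  simp

lemma pvBuckets_aux (gps : List (List (List Int))) (ps : List Nat)
    (d : PySem.Dict (List Int) (List Nat)) (k : List Int) :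
    ((ps.foldl (fun d i => d.insert (pvSegStart (gps.getD i []))
        (d.getD (pvSegStart (gps.getD i [])) [] ++ [i])) d).getD k []) =
      d.getD k [] ++ ps.filter (fun i => pvSegStart (gps.getD i []) == k) := by
  induction ps generalizing d with
  | nil => simp
  | cons i ps ih =>
    simp only [List.foldl_cons, List.filter_cons]
    rw [ih, PySem.Dict.getD_insert]
    by_cases hk : k = pvSegStart (gps.getD i [])
    · subst hk
      rw [if_pos rfl]
      simp
    · rw [if_neg hk]
      have hb : (pvSegStart (gps.getD i []) == k) = false := by
        simp only [beq_eq_false_iff_ne]; exact fun h => hk h.symm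
      simp [hb]
      exact fun h => hk h.symm

lemma pvBuckets_getD (gps : List (List (List Int))) (k : List Int) :
    (pvBuckets gps).getD k [] =
      ((List.range gps.length).filter (fun i => pvSegStart (gps.getD i []) == k)).reverse := by
  unfold pvBuckets
  rw [pvBuckets_aux]
  simp [List.filter_reverse]

-- first match in a sorted index list mapped through f: its position, value, and the
-- effect of erasing at that position
lemma pvFindErase (f : Nat → List (List Int)) (p : List (List Int) → Bool)
    (is : List Nat) (hs : is.Pairwise (· < ·)) (i : Nat) (hi : i ∈ is)
    (hp : p (f i) = true) (hmin : ∀ y ∈ is, p (f y) = true → i ≤ y) :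
    ∃ pos, (is.map f).findIdx? p = some pos ∧ (is.map f).getD pos [] = f i ∧
      (is.map f).eraseIdx pos = (is.filter (fun x => x ≠ i)).map f := by
  induction is with
  | nil => cases hi
  | cons a tl ih =>
    rw [List.pairwise_cons] at hs
    by_cases hpa : p (f a) = true
    · have hia : i = a := by
        rcases List.mem_cons.mp hi with h | h
        · exact h
        · have h1 : a < i := hs.1 _ h
          have h2 : i ≤ a := hmin a (List.mem_cons_self) hpa
          omega
      subst hia
      refine ⟨0, ?_, ?_, ?_⟩
      · simp [List.findIdx?_cons, hpa]
      · simp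
      · have hflt : tl.filter (fun x => !decide (x = i)) = tl := by
          apply List.filter_eq_self.mpr
          intro x hx
          have : i < x := hs.1 _ hx
          simp; omega
        simp [List.filter_cons, hflt]
    · have hai : a ≠ i := fun h => hpa (h ▸ hp)
      have hitl : i ∈ tl := by
        rcases List.mem_cons.mp hi with h | h
        · exact absurd h.symm hai
        · exact h
      obtain ⟨pos, h1, h2, h3⟩ := ih hs.2 hitl (fun y hy hpy => hmin y (List.mem_cons_of_mem _ hy) hpy)
      refine ⟨pos + 1, ?_, ?_, ?_⟩
      · simp [List.findIdx?_cons, hpa, h1]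
      · simpa using h2
      · simp only [List.map_cons, List.eraseIdx_cons_succ, List.filter_cons]
        simp [hai, h3]

lemma pvState_zero (gps : List (List (List Int))) (used : List Nat) :
    pvState gps 0 used = [] := by simp [pvState]

lemma pvState_succ (gps : List (List (List Int))) (j : Nat) (used : List Nat) :
    pvState gps (j + 1) used =
      if j ∈ used then pvState gps j used
      else pvState gps j used ++ [gps.getD j []] := by
  unfold pvState
  rw [List.range_succ, List.filter_append]
  by_cases h : j ∈ used <;> simp [h]

lemma pvState_congr (gps : List (List (List Int))) (j : Nat) {used used' : List Nat}
    (h : ∀ i, i < j → (i ∈ used' ↔ i ∈ used)) :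
    pvState gps j used' = pvState gps j used := by
  unfold pvState
  congr 1
  apply List.filter_congr
  intro i hi
  have := h i (List.mem_range.mp hi)
  by_cases hm : i ∈ used
  · simp [hm, this.mpr hm]
  · have h1 : i ∉ used' := fun hc => hm (this.mp hc)
    simp [hm, h1]

lemma pvDropWhileHeadFalse {α : Type} (p : α → Bool) (l : List α) (x : α) (tl : List α)
    (h : l.dropWhile p = x :: tl) : p x = false := by
  have hw : l.dropWhile p ≠ [] := by rw [h]; exact List.cons_ne_nil x tl
  have h1 := List.head_dropWhile_not p (l := l) (w := hw)
  have h2 : (l.dropWhile p).head hw = x := by simp [h]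
  rw [h2] at h1
  simpa using h1

lemma pvSim (gps : List (List (List Int))) :
    ∀ (j : Nat) (used : List Nat) (bk : PySem.Dict (List Int) (List Nat)),
      pvInv gps j used bk →
      pvGoB gps j used bk =
        ((pvGoA (pvState gps j used)).filter (fun s => pvSegStart s == pvSegEnd s),
         (pvGoA (pvState gps j used)).filter (fun s => !(pvSegStart s == pvSegEnd s))) := by
  intro j
  induction j with
  | zero =>
    intro used bk _
    simp [pvGoB, pvState_zero, pvGoA_nil]
  | succ j ih =>
    intro used bk hinv
    obtain ⟨hjn, hge, hbk⟩ := hinv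
    have hjlt : j < gps.length := hjn
    by_cases hj : j ∈ used
    · have hstep : pvGoB gps (j + 1) used bk = pvGoB gps j used bk := by
        simp only [pvGoB, PySem.Set.contains_eq_listContains]
        rw [if_pos (by simpa [List.contains_iff_mem] using hj)]
      rw [hstep, pvState_succ]
      simp only [hj, if_true]
      refine ih used bk ⟨by omega, ?_, hbk⟩
      intro i h1 h2
      rcases Nat.eq_or_lt_of_le h1 with h | h
      · exact h ▸ hj
      · exact hge i h h2
    · -- the index j is processed this round
      have hju1 : ∀ x, x ∈ PySem.Set.add used j ↔ x ∈ used ∨ x = j :=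
        fun x => PySem.Set.mem_add used j x
      obtain ⟨hbs, hbsound, hbcomplete⟩ := hbk (pvSegEnd (gps.getD j []))
      have hseq : pvState gps j (PySem.Set.add used j) = pvState gps j used := by
        apply pvState_congr
        intro i hi
        rw [hju1]
        constructor
        · rintro (h | rfl)
          · exact h
          · omega
        · exact Or.inl
      have hstate : pvState gps (j + 1) used = pvState gps j (PySem.Set.add used j) ++ [gps.getD j []] := by
        rw [pvState_succ, if_neg hj, hseq]
      rw [hstate, pvGoA_concat]
      cases hpr : ((bk.getD (pvSegEnd (gps.getD j [])) []).reverse).dropWhile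
          (fun i => PySem.Set.contains (PySem.Set.add used j) i) with
      | nil =>
        have hall : ∀ x ∈ (bk.getD (pvSegEnd (gps.getD j [])) []).reverse, x ∈ PySem.Set.add used j := by
          rw [List.dropWhile_eq_nil_iff] at hpr
          intro x hx
          have := hpr x hx
          simpa [List.contains_iff_mem] using this
        have hfind : (pvState gps j (PySem.Set.add used j)).findIdx?
            (fun s => pvSegEnd (gps.getD j []) == pvSegStart s) = none := by
          rw [List.findIdx?_eq_none_iff]
          intro s hs
          rcases List.mem_map.mp hs with ⟨x, hx, rfl⟩
          rcases List.mem_filter.mp hx with ⟨hxr, hxu⟩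
          have hxj : x < j := List.mem_range.mp hxr
          have hxu' : x ∉ PySem.Set.add used j := by simpa using hxu
          simp only [Bool.not_eq_true, beq_eq_false_iff_ne]
          intro hc
          have hxb : x ∈ (bk.getD (pvSegEnd (gps.getD j [])) []).reverse :=
            hbcomplete x (by omega) (fun h => hxu' ((hju1 x).mpr (Or.inl h))) hc.symm
          exact hxu' (hall x hxb)
        rw [hfind]
        have hstep : pvGoB gps (j + 1) used bk =
            (if pvSegStart (gps.getD j []) == pvSegEnd (gps.getD j []) then
              ((pvGoB gps j (PySem.Set.add used j) (bk.insert (pvSegEnd (gps.getD j [])) [])).1.cons (gps.getD j []),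
               (pvGoB gps j (PySem.Set.add used j) (bk.insert (pvSegEnd (gps.getD j [])) [])).2)
             else
              ((pvGoB gps j (PySem.Set.add used j) (bk.insert (pvSegEnd (gps.getD j [])) [])).1,
               (pvGoB gps j (PySem.Set.add used j) (bk.insert (pvSegEnd (gps.getD j [])) [])).2.cons (gps.getD j []))) := by
          simp only [pvGoB, PySem.Set.contains_eq_listContains]
          rw [if_neg (by simpa [List.contains_iff_mem] using hj)]
          simp only [← PySem.Set.contains_eq_listContains, hpr]
        have hinv' : pvInv gps j (PySem.Set.add used j) (bk.insert (pvSegEnd (gps.getD j [])) []) := by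
          refine ⟨by omega, ?_, ?_⟩
          · intro i h1 h2
            rcases Nat.eq_or_lt_of_le h1 with h | h
            · exact (hju1 i).mpr (Or.inr h.symm)
            · exact (hju1 i).mpr (Or.inl (hge i h h2))
          · intro k
            by_cases hk : k = pvSegEnd (gps.getD j [])
            · subst hk
              simp only [PySem.Dict.getD_insert, if_pos rfl, List.reverse_nil]
              refine ⟨List.Pairwise.nil, by simp, ?_⟩
              intro i hi hiu hks
              exact absurd (hall i (hbcomplete i hi (fun h => hiu ((hju1 i).mpr (Or.inl h))) hks)) hiu
            · obtain ⟨q1, q2, q3⟩ := hbk k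
              rw [PySem.Dict.getD_insert]
              rw [if_neg hk]
              exact ⟨q1, q2, fun i h1 h2 h3 => q3 i h1 (fun h => h2 ((hju1 i).mpr (Or.inl h))) h3⟩
        rw [hstep, ih _ _ hinv']
        cases hq : (pvSegStart (gps.getD j []) == pvSegEnd (gps.getD j [])) <;>
          simp [List.filter_cons, hq] <;> simpa using hq
      | cons i brest =>
        have hprsub : (i :: brest).Sublist ((bk.getD (pvSegEnd (gps.getD j [])) []).reverse) :=
          hpr ▸ List.dropWhile_sublist _
        have hib : i ∈ (bk.getD (pvSegEnd (gps.getD j [])) []).reverse :=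
          hprsub.subset List.mem_cons_self
        have hiu1 : i ∉ PySem.Set.add used j := by
          have := pvDropWhileHeadFalse _ _ _ _ hpr
          simpa [List.contains_iff_mem] using this
        have hprpw : (i :: brest).Pairwise (· < ·) := hpr ▸ hbs.sublist (List.dropWhile_sublist _)
        have hmin : ∀ y ∈ (bk.getD (pvSegEnd (gps.getD j [])) []).reverse, y ∉ PySem.Set.add used j → i ≤ y := by
          intro y hy hyu
          have hdecomp := List.takeWhile_append_dropWhile
            (l := (bk.getD (pvSegEnd (gps.getD j [])) []).reverse)
            (p := fun i => PySem.Set.contains (PySem.Set.add used j) i)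
          rcases List.mem_append.mp (by rw [hdecomp]; exact hy) with h1 | h2
          · exact absurd (by simpa [List.contains_iff_mem] using List.mem_takeWhile_imp h1) hyu
          · rw [hpr] at h2
            rcases List.mem_cons.mp h2 with rfl | h2
            · exact le_refl _
            · exact le_of_lt ((List.pairwise_cons.mp hprpw).1 _ h2)
        obtain ⟨hin, hksi⟩ := hbsound i hib
        have hiu : i ∉ used := fun h => hiu1 ((hju1 i).mpr (Or.inl h))
        have hij : i ≠ j := fun h => hiu1 ((hju1 i).mpr (Or.inr h))
        have hilt : i < j := by
          by_contra hc
          exact hiu (hge i (by omega) hin)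
        have hi1 : i ∈ (List.range j).filter (fun x => !decide (x ∈ PySem.Set.add used j)) := by
          rw [List.mem_filter]
          exact ⟨List.mem_range.mpr hilt, by simpa using hiu1⟩
        have hsorted : ((List.range j).filter (fun x => !decide (x ∈ PySem.Set.add used j))).Pairwise (· < ·) :=
          List.pairwise_lt_range.filter _
        obtain ⟨pos, hfind, hget, herase⟩ :=
          pvFindErase (fun x => gps.getD x []) (fun s => pvSegEnd (gps.getD j []) == pvSegStart s)
            ((List.range j).filter (fun x => !decide (x ∈ PySem.Set.add used j))) hsorted i hi1
            (by simp only [beq_iff_eq]; exact hksi.symm)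
            (by
              intro y hy hpy
              rcases List.mem_filter.mp hy with ⟨hyr, hyu⟩
              have hyj : y < j := List.mem_range.mp hyr
              have hyu' : y ∉ PySem.Set.add used j := by simpa using hyu
              have hyb : y ∈ (bk.getD (pvSegEnd (gps.getD j [])) []).reverse :=
                hbcomplete y (by omega) (fun h => hyu' ((hju1 y).mpr (Or.inl h)))
                  (by simpa using (beq_iff_eq.mp hpy).symm)
              exact hmin y hyb hyu')
        have hfind' : (pvState gps j (PySem.Set.add used j)).findIdx?
            (fun s => pvSegEnd (gps.getD j []) == pvSegStart s) = some pos := hfind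
        rw [hfind']
        have hju2 : ∀ x, x ∈ PySem.Set.add (PySem.Set.add used j) i ↔
            x ∈ PySem.Set.add used j ∨ x = i :=
          fun x => PySem.Set.mem_add (PySem.Set.add used j) i x
        have hstep : pvGoB gps (j + 1) used bk =
            (if pvSegStart ((gps.getD j []).dropLast ++ gps.getD i []) ==
                pvSegEnd ((gps.getD j []).dropLast ++ gps.getD i []) then
              (((gps.getD j []).dropLast ++ gps.getD i []) ::
                 (pvGoB gps j (PySem.Set.add (PySem.Set.add used j) i)
                   (bk.insert (pvSegEnd (gps.getD j [])) brest.reverse)).1,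
               (pvGoB gps j (PySem.Set.add (PySem.Set.add used j) i)
                 (bk.insert (pvSegEnd (gps.getD j [])) brest.reverse)).2)
             else
              ((pvGoB gps j (PySem.Set.add (PySem.Set.add used j) i)
                 (bk.insert (pvSegEnd (gps.getD j [])) brest.reverse)).1,
               ((gps.getD j []).dropLast ++ gps.getD i []) ::
                 (pvGoB gps j (PySem.Set.add (PySem.Set.add used j) i)
                   (bk.insert (pvSegEnd (gps.getD j [])) brest.reverse)).2)) := by
          simp only [pvGoB, PySem.Set.contains_eq_listContains]
          rw [if_neg (by simpa [List.contains_iff_mem] using hj)]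
          simp only [← PySem.Set.contains_eq_listContains, hpr]
        have hinv' : pvInv gps j (PySem.Set.add (PySem.Set.add used j) i)
            (bk.insert (pvSegEnd (gps.getD j [])) brest.reverse) := by
          refine ⟨by omega, ?_, ?_⟩
          · intro x h1 h2
            rcases Nat.eq_or_lt_of_le h1 with h | h
            · exact (hju2 x).mpr (Or.inl ((hju1 x).mpr (Or.inr h.symm)))
            · exact (hju2 x).mpr (Or.inl ((hju1 x).mpr (Or.inl (hge x h h2))))
          · intro k
            by_cases hk : k = pvSegEnd (gps.getD j [])
            · subst hk
              rw [PySem.Dict.getD_insert, if_pos rfl, List.reverse_reverse]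
              have hbrest : brest.Sublist ((bk.getD (pvSegEnd (gps.getD j [])) []).reverse) :=
                (List.sublist_cons_self i brest).trans hprsub
              refine ⟨hbs.sublist hbrest, fun x hx => hbsound x (hbrest.subset hx), ?_⟩
              intro x h1 h2 h3
              have hxb : x ∈ (bk.getD (pvSegEnd (gps.getD j [])) []).reverse :=
                hbcomplete x h1
                  (fun h => h2 ((hju2 x).mpr (Or.inl ((hju1 x).mpr (Or.inl h))))) h3
              have hdecomp := List.takeWhile_append_dropWhile
                (l := (bk.getD (pvSegEnd (gps.getD j [])) []).reverse)
                (p := fun i => PySem.Set.contains (PySem.Set.add used j) i)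
              rcases List.mem_append.mp (by rw [hdecomp]; exact hxb) with h4 | h4
              · exact absurd
                  ((hju2 x).mpr (Or.inl (by
                    simpa [List.contains_iff_mem] using List.mem_takeWhile_imp h4))) h2
              · rw [hpr] at h4
                rcases List.mem_cons.mp h4 with rfl | h4
                · exact absurd ((hju2 x).mpr (Or.inr rfl)) h2
                · exact h4
            · obtain ⟨q1, q2, q3⟩ := hbk k
              rw [PySem.Dict.getD_insert, if_neg hk]
              refine ⟨q1, q2, ?_⟩
              intro x h1 h2 h3
              exact q3 x h1
                (fun h => h2 ((hju2 x).mpr (Or.inl ((hju1 x).mpr (Or.inl h))))) h3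
        rw [hstep, ih _ _ hinv']
        have hstate2 : pvState gps j (PySem.Set.add (PySem.Set.add used j) i) =
            (((List.range j).filter (fun x => !decide (x ∈ PySem.Set.add used j))).filter
              (fun x => x ≠ i)).map (fun x => gps.getD x []) := by
          unfold pvState
          congr 1
          rw [List.filter_filter]
          apply List.filter_congr
          intro x _
          by_cases h1 : x ∈ PySem.Set.add used j <;> by_cases h2 : x = i <;>
            simp [hju2, h1, h2]
        simp only [pvState] at hget herase ⊢
        rw [hget, herase, ← (by simp only [pvState] at hstate2 ⊢; exact hstate2 :
          _ = (((List.range j).filter (fun x => !decide (x ∈ PySem.Set.add used j))).filter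
            (fun x => x ≠ i)).map (fun x => gps.getD x []))]
        cases hq : (pvSegStart ((gps.getD j []).dropLast ++ gps.getD i []) ==
            pvSegEnd ((gps.getD j []).dropLast ++ gps.getD i [])) <;>
          simp [List.filter_cons, hq] <;> simpa using hq
-- ===== VERDICT (by name: the statement is the Claim_ definition above) =====
lemma pvState_top (gps : List (List (List Int))) :
    pvState gps gps.length [] = gps := by
  unfold pvState
  simp only [List.mem_nil_iff, decide_false, Bool.not_false, List.filter_true]
  apply List.ext_getElem
  · simp
  · intro n h1 h2
    simp [List.getElem?_eq_getElem h2]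

lemma pvInv_init (gps : List (List (List Int))) :
    pvInv gps gps.length [] (pvBuckets gps) := by
  refine ⟨le_refl _, fun i h1 h2 => absurd (Nat.lt_of_le_of_lt h1 h2) (lt_irrefl _), ?_⟩
  intro k
  rw [pvBuckets_getD, List.reverse_reverse]
  refine ⟨List.pairwise_lt_range.filter _, ?_, ?_⟩
  · intro x hx
    rcases List.mem_filter.mp hx with ⟨h1, h2⟩
    exact ⟨List.mem_range.mp h1, beq_iff_eq.mp h2⟩
  · intro x h1 _ h3
    exact List.mem_filter.mpr ⟨List.mem_range.mpr h1, by simpa using h3⟩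

-- ===== VERDICT (by name: the statement is the Claim_ definition above) =====
theorem combineSegmentPairs_spec : Claim_equal_combineSegmentPairs := by
  intro gps _ _
  unfold Spec_combineSegmentPairs combineSegmentPairs combineSegmentPairs_alt
  rw [pvSearch_eq]
  have h := pvSim gps gps.length PySem.Set.empty (pvBuckets gps) (pvInv_init gps)
  rw [show (PySem.Set.empty : PySem.Set Nat) = ([] : List Nat) from rfl] at h
  rw [pvState_top] at h
  exact h.symm
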